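-- pv_equiv track=rewrite | github.com/adrian-wood/test3 | BUFR_comparison/rougueBUFR_Sequence_comparison.py | hexread
-- ===== SOURCE A (Python) =====
-- def hexread(srex):
--
--    n = 0
--    tsd1 = []
--    for xp in range(0,len(srex),4):
--      n1 = xp
--      n2 = xp + 4
--      if n2 <= len(srex):
--         tvla = srex[n1:n2]
--         tsd1.append(tvla)
-- #
--    tnval3 = []
--    for xpz in range(0,len(tsd1)):
--       tval = bin(int(tsd1[xpz], 16))[2:].zfill(16)
--       tnval3.append(tval)
-- #
--    tdv = []
--    for dv in range(0,len(tnval3)):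
--       tval = tnval3[dv]
--       tv1 = tval[0:2]
--       tv2 = tval[2:8]
--       tv3 = tval[8:]
--       td1 = str(int(tv1,2))
--       td2 = str(int(tv2,2)).zfill(2)
--       td3 = str(int(tv3,2)).zfill(3)
--       tdm = td1 + td2 + td3
--       tdv.append(tdm)
--  #
--    return(tdv)
-- ===== SOURCE B (Python) =====
-- def hexread(srex):
--     out = []
--     for i in range(0, len(srex), 4):
--         chunk = srex[i:i + 4]
--         if len(chunk) < 4:
--             continue
--         v = int(chunk, 16)
--         out.append(f'{v >> 14}{(v >> 8) & 0x3F:02d}{v & 0xFF:03d}')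
--     return out
-- ===== Notes on version B (the rewrite author's own statement) =====
-- stated objective: idiomatic
-- what changed: A's three sequential list-building passes (slice hex chunks, convert each to a 16-char binary string via bin().zfill(), slice that string into three substrings and re-parse each with int(·,2)) are replaced by a single pass that extracts the three descriptor fields from v=int(chunk,16) directly with bit shifts and masks (v>>14, (v>>8)&0x3F, v&0xFF) and formats them in one f-string.
import Mathlib
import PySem

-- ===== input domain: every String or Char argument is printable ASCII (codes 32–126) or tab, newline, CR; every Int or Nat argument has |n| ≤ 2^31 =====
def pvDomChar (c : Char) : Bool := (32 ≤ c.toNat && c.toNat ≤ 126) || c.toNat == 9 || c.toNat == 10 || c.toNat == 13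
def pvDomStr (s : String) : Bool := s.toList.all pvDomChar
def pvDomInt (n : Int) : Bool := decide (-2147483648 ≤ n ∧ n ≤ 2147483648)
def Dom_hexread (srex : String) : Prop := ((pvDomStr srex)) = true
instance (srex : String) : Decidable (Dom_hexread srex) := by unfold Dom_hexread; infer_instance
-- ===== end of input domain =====

-- B replaces A's three sequential list-building passes (4-char chunks → 16-char binary
-- strings → textual bit-slices reparsed with int(·,2)) by a single pass that extracts the
-- three BUFR descriptor fields from int(chunk,16) with shifts and masks.

-- ===== PORT A =====
-- (A's variable `n = 0` is dead and not ported.)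
def hexread (srex : String) : List String :=
  let s := srex.toList
  let tsd1 : List (List Char) :=
    (PySem.List.pyRange 0 (s.length : Int) 4).foldl (fun tsd1 xp =>
      let n1 := xp
      let n2 := xp + 4
      if n2 ≤ (s.length : Int) then tsd1 ++ [PySem.List.slice s (some n1) (some n2)]
      else tsd1) []
  let tnval3 : List (List Char) :=
    (PySem.List.pyRange 0 (tsd1.length : Int) 1).foldl (fun tnval3 xpz =>
      -- bin(int(tsd1[xpz], 16))[2:].zfill(16)
      let tval := PySem.Chars.zfill
        (PySem.List.slice (PySem.Int.toBinChars0b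
          ((PySem.Int.ofCharsBase? (PySem.List.pyGetD tsd1 xpz []) 16).getD 0)) (some 2) none) 16
      tnval3 ++ [tval]) []
  let tdv : List String :=
    (PySem.List.pyRange 0 (tnval3.length : Int) 1).foldl (fun tdv dv =>
      let tval := PySem.List.pyGetD tnval3 dv []
      let tv1 := PySem.List.slice tval (some 0) (some 2)
      let tv2 := PySem.List.slice tval (some 2) (some 8)
      let tv3 := PySem.List.slice tval (some 8) none
      let td1 := PySem.Int.toChars ((PySem.Int.ofCharsBase? tv1 2).getD 0)
      let td2 := PySem.Chars.zfill (PySem.Int.toChars ((PySem.Int.ofCharsBase? tv2 2).getD 0)) 2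
      let td3 := PySem.Chars.zfill (PySem.Int.toChars ((PySem.Int.ofCharsBase? tv3 2).getD 0)) 3
      let tdm := td1 ++ td2 ++ td3
      tdv ++ [String.ofList tdm]) []
  tdv

-- ===== PORT B =====
def hexread_alt (srex : String) : List String :=
  let s := srex.toList
  (PySem.List.pyRange 0 (s.length : Int) 4).foldl (fun out i =>
    let chunk := PySem.List.slice s (some i) (some (i + 4))
    if chunk.length < 4 then out
    else
      let v := (PySem.Int.ofCharsBase? chunk 16).getD 0
      -- f'{v >> 14}{(v >> 8) & 0x3F:02d}{v & 0xFF:03d}' (:0kd = zfill for the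
      -- nonnegative values Pre_ admits)
      out ++ [String.ofList (PySem.Int.toChars (v >>> (14 : Nat))
        ++ PySem.Chars.zfill (PySem.Int.toChars (PySem.Int.band (v >>> (8 : Nat)) 63)) 2
        ++ PySem.Chars.zfill (PySem.Int.toChars (PySem.Int.band v 255)) 3)]) []

-- ===== PRECONDITION & SPEC =====
-- Pre_: every full 4-char chunk parses by Python's int(·,16) to a value in [0, 65536)
-- (the upper bound is automatic for a 4-char chunk and excludes nothing).  Exactly on
-- these inputs A returns: a chunk int(·,16) rejects makes A raise ValueError there, and
-- a chunk parsing negative leaves a letter from the 0b prefix in A's sliced binary string, so A's int(·,2) raises.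
def Pre_hexread (srex : String) : Prop :=
  ∀ k, k < srex.toList.length / 4 →
    let p := PySem.Int.ofCharsBase? ((srex.toList.drop (4 * k)).take 4) 16
    p.isSome = true ∧ 0 ≤ p.getD 0 ∧ p.getD 0 < 65536
instance (srex : String) : Decidable (Pre_hexread srex) := by unfold Pre_hexread; infer_instance

def pvWitness_hexread : String := "00540203"

def Spec_hexread (srex : String) (out : List String) : Prop := out = hexread_alt srex
instance (srex : String) (out : List String) : Decidable (Spec_hexread srex out) := by unfold Spec_hexread; infer_instance

-- ===== CLAIM (what is proved, stated in full; the proofs are below) =====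
def Claim_equal_hexread : Prop := ∀ (srex : String), Dom_hexread srex → Pre_hexread srex → Spec_hexread srex (hexread srex)

-- ===== LEMMAS AND PROOFS =====

def binMSB (n : Nat) : List Char :=
  if h : n < 2 then [Nat.digitChar n] else binMSB (n / 2) ++ [Nat.digitChar (n % 2)]
decreasing_by exact Nat.div_lt_self (by omega) (by omega)

def bitsF : Nat → Nat → List Char
  | 0, _ => []
  | k+1, n => bitsF k (n / 2) ++ [Nat.digitChar (n % 2)]

theorem length_bitsF (k n : Nat) : (bitsF k n).length = k := by
  induction k generalizing n with
  | zero => rfl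
  | succ k ih => simp [bitsF, ih]

theorem bitsF_zero (k : Nat) : bitsF k 0 = List.replicate k '0' := by
  induction k with
  | zero => rfl
  | succ k ih => simp [bitsF, ih, List.replicate_succ' ]; rfl

theorem bitsF_split (a b n : Nat) : bitsF (a + b) n = bitsF a (n / 2 ^ b) ++ bitsF b (n % 2 ^ b) := by
  induction b generalizing n with
  | zero => simp [bitsF]
  | succ b ih =>
    show bitsF (a+b) (n/2) ++ [Nat.digitChar (n % 2)] = _
    rw [ih]
    have h1 : n / 2 / 2 ^ b = n / 2 ^ (b+1) := by
      rw [Nat.div_div_eq_div_mul, pow_succ']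
    have h2 : (n % 2 ^ (b+1)) / 2 = (n / 2) % 2 ^ b := by
      rw [pow_succ']
      exact Nat.mod_mul_right_div_self n 2 (2^b)
    have h3 : n % 2 ^ (b+1) % 2 = n % 2 := by
      exact Nat.mod_mod_of_dvd n (dvd_pow_self 2 (by omega))
    show _ = bitsF a (n / 2^(b+1)) ++ (bitsF b ((n % 2^(b+1))/2) ++ [Nat.digitChar (n % 2^(b+1) % 2)])
    rw [h1, h2, h3, List.append_assoc]

theorem toDigitsCore_eq (f n : Nat) (l : List Char) (h : n ≤ f) :
    Nat.toDigitsCore 2 (f + 1) n l = binMSB n ++ l := by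
  induction f generalizing n l with
  | zero =>
    have : n = 0 := by omega
    subst this
    simp [Nat.toDigitsCore, binMSB]
  | succ f ih =>
    rw [Nat.toDigitsCore]
    by_cases h2 : n / 2 = 0
    · rw [if_pos h2, binMSB]
      rw [dif_pos (by omega)]
      have : n % 2 = n := by omega
      rw [this]; rfl
    · rw [if_neg h2, ih (n/2) _ (by omega)]
      conv_rhs => rw [binMSB]
      rw [dif_neg (by omega), List.append_assoc]
      rfl

theorem toDigits_two (n : Nat) : Nat.toDigits 2 n = binMSB n := by
  show Nat.toDigitsCore 2 (n+1) n [] = binMSB n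
  rw [toDigitsCore_eq n n [] le_rfl, List.append_nil]

theorem binMSB_chars (n : Nat) : ∀ c ∈ binMSB n, c = '0' ∨ c = '1' := by
  intro c hc
  induction n using Nat.strong_induction_on with
  | _ n ih =>
    rw [binMSB] at hc
    split at hc
    · interval_cases n <;> simp_all <;> decide
    · rw [List.mem_append] at hc
      rcases hc with hc | hc
      · exact ih (n/2) (Nat.div_lt_self (by omega) (by omega)) hc
      · have : n % 2 < 2 := Nat.mod_lt _ (by omega)
        interval_cases h : n % 2 <;> simp_all <;> decide

theorem binMSB_ne_nil (n : Nat) : binMSB n ≠ [] := by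
  rw [binMSB]; split <;> simp

theorem zfill_digits (cs : List Char) (hne : cs ≠ []) (hd : ∀ c ∈ cs, c = '0' ∨ c = '1') (w : Int) :
    PySem.Chars.zfill cs w = List.replicate (w.toNat - cs.length) '0' ++ cs := by
  rw [PySem.Chars.zfill.eq_def]
  by_cases h : w ≤ (cs.length : Int)
  · rw [if_pos h]
    have : w.toNat - cs.length = 0 := by omega
    rw [this, List.replicate_zero, List.nil_append]
  · rw [if_neg h]
    cases cs with
    | nil => exact absurd rfl hne
    | cons c rest =>
      have hc := hd c List.mem_cons_self
      have : ¬ (c = '+' ∨ c = '-') := by rcases hc with h|h <;> subst h <;> decide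
      simp only [this, if_false]

theorem pad (k n : Nat) (h : n < 2 ^ k) (hk : 0 < k) :
    List.replicate (k - (binMSB n).length) '0' ++ binMSB n = bitsF k n := by
  induction k generalizing n with
  | zero => omega
  | succ k ih =>
    by_cases hn : n < 2
    · rw [binMSB, dif_pos hn]
      show List.replicate (k + 1 - 1) '0' ++ [Nat.digitChar n] = bitsF (k+1) n
      have h2 : n / 2 = 0 := by omega
      have h3 : n % 2 = n := by omega
      show _ = bitsF k (n/2) ++ [Nat.digitChar (n % 2)]
      rw [h2, h3, bitsF_zero, Nat.add_sub_cancel]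
    · rw [binMSB, dif_neg hn]
      have hk0 : 0 < k := by
        by_contra hc
        have : k = 0 := by omega
        subst this; omega
      have hlt : n / 2 < 2 ^ k := by
        rw [pow_succ] at h; omega
      have := ih (n / 2) hlt hk0
      rw [List.length_append, List.length_singleton]
      have hlen : (binMSB (n/2)).length ≤ k := by
        have hl := congrArg List.length this
        rw [List.length_append, List.length_replicate, length_bitsF] at hl
        omega
      have : k + 1 - ((binMSB (n/2)).length + 1) = k - (binMSB (n/2)).length := by omega
      rw [this, ← List.append_assoc, ih (n/2) hlt hk0]
      show _ = bitsF k (n/2) ++ [Nat.digitChar (n%2)]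
      rfl

theorem pad16 (n : Nat) (h : n < 2 ^ 16) :
    PySem.Chars.zfill (binMSB n) 16 = bitsF 16 n := by
  rw [zfill_digits _ (binMSB_ne_nil n) (binMSB_chars n) 16]
  have hlen : (binMSB n).length ≤ 16 := by
    rw [← toDigits_two]; exact Nat.toDigits_length 2 n 16 (by omega) h
  have : ((16:Int)).toNat = 16 := rfl
  rw [this]
  exact pad 16 n h (by omega)

set_option maxRecDepth 20000 in
theorem parse2 : ∀ i : Fin 4, (PySem.Int.ofCharsBase? (bitsF 2 i) 2).getD 0 = (i : Int) := by decide

set_option maxRecDepth 20000 in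
theorem parse6 : ∀ i : Fin 64, (PySem.Int.ofCharsBase? (bitsF 6 i) 2).getD 0 = (i : Int) := by decide

set_option maxRecDepth 100000 in
set_option maxHeartbeats 1000000 in
theorem parse8 : ∀ i : Fin 256, (PySem.Int.ofCharsBase? (bitsF 8 i) 2).getD 0 = (i : Int) := by decide

set_option maxHeartbeats 2000000 in
theorem perChunk (v : Int) (h0 : 0 ≤ v) (h1 : v < 65536) :
    (let tval := PySem.Chars.zfill (PySem.List.slice (PySem.Int.toBinChars0b v) (some 2) none) 16
     let tv1 := PySem.List.slice tval (some 0) (some 2)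
     let tv2 := PySem.List.slice tval (some 2) (some 8)
     let tv3 := PySem.List.slice tval (some 8) none
     PySem.Int.toChars ((PySem.Int.ofCharsBase? tv1 2).getD 0)
       ++ PySem.Chars.zfill (PySem.Int.toChars ((PySem.Int.ofCharsBase? tv2 2).getD 0)) 2
       ++ PySem.Chars.zfill (PySem.Int.toChars ((PySem.Int.ofCharsBase? tv3 2).getD 0)) 3)
    = PySem.Int.toChars (v >>> (14 : Nat))
       ++ PySem.Chars.zfill (PySem.Int.toChars (PySem.Int.band (v >>> (8 : Nat)) 63)) 2
       ++ PySem.Chars.zfill (PySem.Int.toChars (PySem.Int.band v 255)) 3 := by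
  obtain ⟨m, rfl⟩ : ∃ m : Nat, v = (m : Int) := ⟨v.toNat, (Int.toNat_of_nonneg h0).symm⟩
  have hm : m < 65536 := by exact_mod_cast h1
  -- A side: the 16-char binary string is bitsF 16 m
  have hbin : PySem.Int.toBinChars0b (m : Int) = '0' :: 'b' :: Nat.toDigits 2 m := by
    rw [PySem.Int.toBinChars0b, if_neg (by omega)]
    simp
  have htval : PySem.Chars.zfill (PySem.List.slice (PySem.Int.toBinChars0b (m:Int)) (some 2) none) 16
      = bitsF 16 m := by
    rw [hbin, PySem.List.slice_from _ (by norm_num : (0:Int) ≤ 2)]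
    show PySem.Chars.zfill (Nat.toDigits 2 m) 16 = _
    rw [toDigits_two, pad16 m (by omega)]
  simp only [htval]
  -- slices
  have hsplit : bitsF 16 m = bitsF 2 (m / 2 ^ 14) ++ (bitsF 6 (m / 2 ^ 8 % 2 ^ 6) ++ bitsF 8 (m % 2 ^ 8)) := by
    have e1 := bitsF_split 2 14 m
    have e2 := bitsF_split 6 8 (m % 2 ^ 14)
    have h2 : m % 2 ^ 14 / 2 ^ 8 = m / 2 ^ 8 % 2 ^ 6 := by
      have := Nat.mod_mul_right_div_self m (2^8) (2^6)
      simpa using this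
    have h3 : m % 2 ^ 14 % 2 ^ 8 = m % 2 ^ 8 := Nat.mod_mod_of_dvd m (by norm_num)
    rw [show (16:Nat) = 2 + 14 from rfl, e1, e2, h2, h3]
  have hsplit' : bitsF 16 m = (bitsF 2 (m / 2 ^ 14) ++ bitsF 6 (m / 2 ^ 8 % 2 ^ 6)) ++ bitsF 8 (m % 2 ^ 8) := by
    rw [hsplit, List.append_assoc]
  have hlen2 : (bitsF 2 (m / 2 ^ 14)).length = 2 := length_bitsF _ _
  have htv1 : PySem.List.slice (bitsF 16 m) (some 0) (some 2) = bitsF 2 (m / 2 ^ 14) := by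
    rw [PySem.List.slice_toNat _ (by norm_num) (by norm_num), hsplit]
    show List.take (Int.toNat 2 - Int.toNat 0) (List.drop (Int.toNat 0) _) = _
    rw [show Int.toNat 2 - Int.toNat 0 = 2 from rfl, show Int.toNat 0 = 0 from rfl, List.drop_zero,
      List.take_left' hlen2]
  have htv2 : PySem.List.slice (bitsF 16 m) (some 2) (some 8) = bitsF 6 (m / 2 ^ 8 % 2 ^ 6) := by
    rw [PySem.List.slice_toNat _ (by norm_num) (by norm_num), hsplit]
    show List.take (Int.toNat 8 - Int.toNat 2) (List.drop (Int.toNat 2) _) = _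
    rw [show Int.toNat 8 - Int.toNat 2 = 6 from rfl, show Int.toNat 2 = 2 from rfl,
      List.drop_left' hlen2, List.take_left' (length_bitsF _ _)]
  have htv3 : PySem.List.slice (bitsF 16 m) (some 8) none = bitsF 8 (m % 2 ^ 8) := by
    rw [PySem.List.slice_from _ (by norm_num : (0:Int) ≤ 8), hsplit']
    show List.drop (Int.toNat 8) _ = _
    rw [show Int.toNat 8 = 8 from rfl, List.drop_left' (by rw [List.length_append, hlen2, length_bitsF])]
  rw [htv1, htv2, htv3]
  -- parse each field back
  have ha : m / 2 ^ 14 < 4 := by omega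
  have hb : m / 2 ^ 8 % 2 ^ 6 < 64 := Nat.mod_lt _ (by norm_num)
  have hc : m % 2 ^ 8 < 256 := Nat.mod_lt _ (by norm_num)
  have p1 := parse2 ⟨m / 2 ^ 14, ha⟩
  have p2 := parse6 ⟨m / 2 ^ 8 % 2 ^ 6, hb⟩
  have p3 := parse8 ⟨m % 2 ^ 8, hc⟩
  rw [p1, p2, p3]
  -- B side field values
  have e1 : (m : Int) >>> (14 : Nat) = ((m / 2 ^ 14 : Nat) : Int) := by
    show ((m >>> 14 : Nat) : Int) = _
    rw [Nat.shiftRight_eq_div_pow]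
  have e2 : PySem.Int.band ((m : Int) >>> (8 : Nat)) 63 = ((m / 2 ^ 8 % 2 ^ 6 : Nat) : Int) := by
    show PySem.Int.band ((m >>> 8 : Nat) : Int) 63 = _
    have hnat : (m >>> 8) &&& 63 = m / 2 ^ 8 % 2 ^ 6 := by
      rw [show (63 : Nat) = 2 ^ 6 - 1 from rfl, Nat.and_two_pow_sub_one_eq_mod, Nat.shiftRight_eq_div_pow]
    rw [show (63 : Int) = ((63 : Nat) : Int) from rfl, PySem.Int.band_natCast, hnat]
  have e3 : PySem.Int.band (m : Int) 255 = ((m % 2 ^ 8 : Nat) : Int) := by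
    have hnat : m &&& 255 = m % 2 ^ 8 := by
      rw [show (255 : Nat) = 2 ^ 8 - 1 from rfl, Nat.and_two_pow_sub_one_eq_mod]
    rw [show (255 : Int) = ((255 : Nat) : Int) from rfl, PySem.Int.band_natCast, hnat]
  rw [e1, e2, e3]


theorem hexread_main (srex : String) (hpre : Pre_hexread srex) :
    hexread srex = hexread_alt srex := by
  unfold Pre_hexread at hpre
  simp only [] at hpre
  unfold hexread hexread_alt
  simp only []
  set s := srex.toList with hs
  set L := s.length with hL
  -- named per-stage functions
  set chunkF : Int → List Char := fun xp => PySem.List.slice s (some xp) (some (xp + 4)) with hchunkF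
  set g2 : List Char → List Char := fun c => PySem.Chars.zfill
      (PySem.List.slice (PySem.Int.toBinChars0b
        ((PySem.Int.ofCharsBase? c 16).getD 0)) (some 2) none) 16 with hg2
  set g3 : List Char → String := fun tval => String.ofList
      (PySem.Int.toChars ((PySem.Int.ofCharsBase? (PySem.List.slice tval (some 0) (some 2)) 2).getD 0)
       ++ PySem.Chars.zfill (PySem.Int.toChars ((PySem.Int.ofCharsBase? (PySem.List.slice tval (some 2) (some 8)) 2).getD 0)) 2
       ++ PySem.Chars.zfill (PySem.Int.toChars ((PySem.Int.ofCharsBase? (PySem.List.slice tval (some 8) none) 2).getD 0)) 3) with hg3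
  set hB : List Char → String := fun chunk =>
      String.ofList (PySem.Int.toChars (((PySem.Int.ofCharsBase? chunk 16).getD 0) >>> (14 : Nat))
        ++ PySem.Chars.zfill (PySem.Int.toChars (PySem.Int.band (((PySem.Int.ofCharsBase? chunk 16).getD 0) >>> (8 : Nat)) 63)) 2
        ++ PySem.Chars.zfill (PySem.Int.toChars (PySem.Int.band ((PySem.Int.ofCharsBase? chunk 16).getD 0) 255)) 3) with hhB
  -- A, stage 1: build the chunk list
  have step1 := PySem.List.foldl_append_if (fun xp => decide (xp + 4 ≤ (L : Int))) chunkF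
      (PySem.List.pyRange 0 (L : Int) 4) []
  simp only [decide_eq_true_eq, List.nil_append, hchunkF] at step1
  rw [step1]
  -- A, stages 2 and 3: indexed loops become maps
  rw [PySem.List.foldl_pyRange_zero_pyGetD'
        (List.map (fun xp => PySem.List.slice s (some xp) (some (xp + 4)))
          (List.filter (fun xp => decide (xp + 4 ≤ (L:Int))) (PySem.List.pyRange 0 (L:Int) 4))) []
        (fun acc c => acc ++ [g2 c]) []]
  rw [PySem.List.foldl_append_singleton_eq_map g2]
  rw [List.nil_append]
  rw [PySem.List.foldl_pyRange_zero_pyGetD'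
        (List.map g2 (List.map (fun xp => PySem.List.slice s (some xp) (some (xp + 4)))
          (List.filter (fun xp => decide (xp + 4 ≤ (L:Int))) (PySem.List.pyRange 0 (L:Int) 4)))) []
        (fun acc tval => acc ++ [g3 tval]) []]
  rw [PySem.List.foldl_append_singleton_eq_map g3]
  rw [List.nil_append, List.map_map, List.map_map]
  -- B: flip the `continue` branch and turn the loop into filter+map
  have flip : ∀ (out : List String), ∀ i ∈ PySem.List.pyRange 0 (L : Int) 4,
      (fun out i =>
        if (PySem.List.slice s (some i) (some (i + 4))).length < 4 then out
        else out ++ [hB (PySem.List.slice s (some i) (some (i + 4)))]) out i =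
      (fun out i =>
        if (fun j => decide ¬((PySem.List.slice s (some j) (some (j + 4))).length < 4)) i = true
        then out ++ [hB (PySem.List.slice s (some i) (some (i + 4)))] else out) out i := by
    intro out i _
    by_cases h : (PySem.List.slice s (some i) (some (i + 4))).length < 4 <;> simp [h]
  rw [PySem.List.foldl_congr_mem _ _ _ _ flip]
  rw [PySem.List.foldl_append_if
      (fun j => decide ¬((PySem.List.slice s (some j) (some (j + 4))).length < 4))
      (fun i => hB (PySem.List.slice s (some i) (some (i + 4))))]
  rw [List.nil_append]
  -- same filter on both sides
  have hfil : List.filter (fun xp => decide (xp + 4 ≤ (L:Int))) (PySem.List.pyRange 0 (L:Int) 4)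
      = List.filter (fun j => decide ¬((PySem.List.slice s (some j) (some (j + 4))).length < 4))
          (PySem.List.pyRange 0 (L:Int) 4) := by
    apply List.filter_congr
    intro x hx
    obtain ⟨hx0, hxL, -⟩ := (PySem.List.mem_pyRange_iff_of_pos (by norm_num) x).mp hx
    rw [PySem.List.length_slice]
    have c1 : PySem.List.clampIdx L x = min x.toNat L := by
      conv_lhs => rw [show x = ((x.toNat : Nat) : Int) by omega]
      rw [PySem.List.clampIdx_natCast]
    have c2 : PySem.List.clampIdx L (x + 4) = min (x.toNat + 4) L := by
      conv_lhs => rw [show x + 4 = ((x.toNat + 4 : Nat) : Int) by omega]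
      rw [PySem.List.clampIdx_natCast]
    rw [c1, c2]
    simp only [decide_eq_decide]
    omega
  rw [hfil]
  -- per-chunk equality on the surviving indices
  apply List.map_congr_left
  intro x hx
  rw [List.mem_filter] at hx
  obtain ⟨hxr, hq⟩ := hx
  obtain ⟨hx0, hxL, hdvd⟩ := (PySem.List.mem_pyRange_iff_of_pos (by norm_num) x).mp hxr
  obtain ⟨k, hk⟩ : ∃ k : Nat, x = (4 * k : Nat) := by
    obtain ⟨c, hc⟩ := hdvd
    exact ⟨c.toNat, by omega⟩
  -- the chunk is full, so x + 4 ≤ L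
  have hlen : x + 4 ≤ (L : Int) := by
    simp only [decide_eq_true_eq, PySem.List.length_slice] at hq
    have c1 : PySem.List.clampIdx L x = min x.toNat L := by
      conv_lhs => rw [show x = ((x.toNat : Nat) : Int) by omega]
      rw [PySem.List.clampIdx_natCast]
    have c2 : PySem.List.clampIdx L (x + 4) = min (x.toNat + 4) L := by
      conv_lhs => rw [show x + 4 = ((x.toNat + 4 : Nat) : Int) by omega]
      rw [PySem.List.clampIdx_natCast]
    rw [c1, c2] at hq
    omega
  have hchunk : PySem.List.slice s (some x) (some (x + 4)) = List.take 4 (List.drop (4 * k) s) := by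
    rw [PySem.List.slice_toNat _ hx0 (by omega)]
    congr 1
    · omega
    · congr 1; omega
  have hkL : k < L / 4 := by omega
  obtain ⟨-, hv0, hv1⟩ := hpre k hkL
  simp only [Function.comp_apply, hg2, hg3, hhB, hchunk]
  exact congrArg String.ofList
    (perChunk ((PySem.Int.ofCharsBase? (List.take 4 (List.drop (4 * k) s)) 16).getD 0) hv0 hv1)

-- ===== VERDICT (by name: the statement is the Claim_ definition above) =====
theorem hexread_spec : Claim_equal_hexread := by
  intro srex _ hpre
  unfold Spec_hexread
  exact hexread_main srex hpre
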